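-- pv_equiv track=rewrite | github.com/bobpullie/TEMS | src/tems/tems_engine.py | _extract_rule_id
-- ===== SOURCE A (Python) =====
-- from typing import Optional
--
-- def _extract_rule_id(file_path: str) -> Optional[int]:
--     """QMD 파일 경로에서 rule_id 추출.
--
--     QMD는 가상 경로에서 언더스코어→하이픈 변환하므로 둘 다 처리:
--     'qmd://tems-kjongil/rule_0001.md' → 1
--     'qmd://tems-kjongil/rule-0001.md' → 1
--     """
--     try:
--         filename = file_path.rsplit("/", 1)[-1]   # rule_0001.md or rule-0001.md
--         stem = filename.replace(".md", "")          # rule_0001 or rule-0001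
--         # 언더스코어 또는 하이픈으로 분리
--         for sep in ("_", "-"):
--             if sep in stem:
--                 parts = stem.split(sep)
--                 # "rule" + "0001" 형태
--                 if len(parts) >= 2 and parts[-1].isdigit():
--                     return int(parts[-1])
--         return None
--     except (ValueError, IndexError):
--         return None
-- ===== SOURCE B (Python) =====
-- from typing import Optional
--
--
-- def _extract_rule_id(file_path: str) -> Optional[int]:
--     """Scan the stem once from the right: take the trailing digit run and
--     accept it iff it is non-empty and immediately preceded by '_' or '-'."""
--     stem = file_path.rsplit("/", 1)[-1].replace(".md", "")
--     n = len(stem)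
--     i = n
--     while i > 0 and stem[i - 1].isdigit():
--         i -= 1
--     if i < n and i > 0 and stem[i - 1] in "_-":
--         return int(stem[i:])
--     return None
-- ===== Notes on version B (the rewrite author's own statement) =====
-- stated objective: simpler
-- what changed: Replaces the separator loop with its two str.split passes over the stem by a single right-to-left scan that takes the trailing digit run and checks that the character before it is an underscore or a hyphen.
import Mathlib
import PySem

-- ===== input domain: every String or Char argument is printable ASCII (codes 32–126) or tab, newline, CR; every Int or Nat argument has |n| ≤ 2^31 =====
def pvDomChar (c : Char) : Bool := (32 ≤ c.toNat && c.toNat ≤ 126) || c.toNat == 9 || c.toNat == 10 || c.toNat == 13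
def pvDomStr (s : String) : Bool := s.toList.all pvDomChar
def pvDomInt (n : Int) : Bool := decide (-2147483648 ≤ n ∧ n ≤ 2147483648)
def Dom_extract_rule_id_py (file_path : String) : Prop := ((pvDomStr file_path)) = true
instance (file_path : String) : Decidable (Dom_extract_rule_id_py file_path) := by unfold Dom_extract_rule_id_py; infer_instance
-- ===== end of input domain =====

-- B replaces A's separator loop (two str.split passes) by one right-to-left scan of the
-- trailing digit run; same return value, objective: simpler.

-- ===== PORT A =====
-- shared first two lines of BOTH Pythons:
-- file_path.rsplit("/", 1)[-1]  — hand port (PySem has no rsplit): the [-1] element of a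
-- 1-bounded right split is exactly the suffix after the last '/' (the whole string if none),
-- then .replace(".md", "") via PySem.
def pvStem (file_path : String) : List Char :=
  let filename := (file_path.toList.reverse.takeWhile (fun c => c ≠ '/')).reverse
  PySem.Chars.replace filename ".md".toList []

-- for sep in ("_", "-"): if sep in stem: parts = stem.split(sep);
--   if len(parts) >= 2 and parts[-1].isdigit(): return int(parts[-1])
-- int() raising ValueError is caught by A's `except` and returns None, i.e. ofChars? verbatim;
-- parts[-1] is getLastD [] (split always returns a non-empty list).
def pvAFor (stem : List Char) : List (List Char) → Option Int
  | [] => none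
  | sep :: seps =>
    if PySem.Chars.isIn sep stem = true then
      let parts := PySem.Chars.splitOn stem sep
      if 2 ≤ parts.length ∧ PySem.Chars.strIsdigit (parts.getLastD []) = true then
        PySem.Int.ofChars? (parts.getLastD [])
      else pvAFor stem seps
    else pvAFor stem seps

def extract_rule_id_py (file_path : String) : Option Int :=
  pvAFor (pvStem file_path) [['_'], ['-']]

-- ===== PORT B =====
-- while i > 0 and stem[i-1].isdigit(): i -= 1   (stem[i-1] = getD (i-1); i-1 < len inside the loop)
def pvBScan (stem : List Char) : Nat → Nat
  | 0 => 0
  | i + 1 => if PySem.Chars.isdigit (stem.getD i ' ') then pvBScan stem i else i + 1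

def extract_rule_id_py_alt (file_path : String) : Option Int :=
  let stem := pvStem file_path
  let n := stem.length
  let i := pvBScan stem n
  if i < n ∧ 0 < i ∧ (stem.getD (i - 1) ' ' = '_' ∨ stem.getD (i - 1) ' ' = '-') then
    PySem.Int.ofChars? (stem.drop i)   -- int(stem[i:])
  else none

-- ===== PRECONDITION & SPEC =====
def Spec_extract_rule_id_py (file_path : String) (out : Option Int) : Prop := out = extract_rule_id_py_alt file_path
instance (file_path : String) (out : Option Int) : Decidable (Spec_extract_rule_id_py file_path out) := by unfold Spec_extract_rule_id_py; infer_instance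

-- ===== CLAIM (what is proved, stated in full; the proofs are below) =====
def Claim_equal_extract_rule_id_py : Prop := ∀ (file_path : String), Dom_extract_rule_id_py file_path → Spec_extract_rule_id_py file_path (extract_rule_id_py file_path)

-- ===== LEMMAS AND PROOFS =====

-- simple structural model of Python's single-character str.split
def pvCsplit (c : Char) : List Char → List (List Char)
  | [] => [[]]
  | x :: xs =>
    let r := pvCsplit c xs
    if x = c then [] :: r else (x :: r.headD []) :: r.tail

-- the suffix of s after the last occurrence of c (s itself if c ∉ s)
def pvAfterLast (c : Char) : List Char → List Char
  | [] => []
  | x :: xs => if c ∈ xs then pvAfterLast c xs else if x = c then xs else x :: xs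

theorem pvCsplit_ne_nil (c : Char) (s : List Char) : pvCsplit c s ≠ [] := by
  cases s with
  | nil => simp [pvCsplit]
  | cons x xs => simp only [pvCsplit]; split <;> simp

theorem pvCsplit_cons_headD_tail (c : Char) (s : List Char) :
    (pvCsplit c s).headD [] :: (pvCsplit c s).tail = pvCsplit c s := by
  cases h : pvCsplit c s with
  | nil => exact absurd h (pvCsplit_ne_nil c s)
  | cons a l => simp

theorem pvSplitOn_go_eq (c : Char) : ∀ (l : List Char) (fuel : Nat) (cur : List Char)
    (acc : List (List Char)), l.length ≤ fuel →
    PySem.Chars.splitOn.go [c] fuel l cur acc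
      = acc.reverse ++ (cur.reverse ++ (pvCsplit c l).headD []) :: (pvCsplit c l).tail := by
  intro l
  induction l with
  | nil =>
    intro fuel cur acc _
    cases fuel <;> simp [PySem.Chars.splitOn.go, pvCsplit]
  | cons x xs ih =>
    intro fuel cur acc hle
    cases fuel with
    | zero => simp at hle
    | succ f =>
      have hf : xs.length ≤ f := by simpa using hle
      by_cases hx : x = c
      · have hstep : PySem.Chars.splitOn.go [c] (f + 1) (x :: xs) cur acc
            = PySem.Chars.splitOn.go [c] f xs [] (cur.reverse :: acc) := by
          simp [PySem.Chars.splitOn.go, List.isPrefixOf, hx]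
        rw [hstep, ih f [] (cur.reverse :: acc) hf]
        rw [show pvCsplit c (x :: xs) = [] :: pvCsplit c xs by simp [pvCsplit, hx]]
        rw [← pvCsplit_cons_headD_tail c xs]
        simp
      · have hstep : PySem.Chars.splitOn.go [c] (f + 1) (x :: xs) cur acc
            = PySem.Chars.splitOn.go [c] f xs (x :: cur) acc := by
          have hpre : [c].isPrefixOf (x :: xs) = false := by
            simp only [List.isPrefixOf, List.isPrefixOf_nil_left, Bool.and_true, beq_eq_false_iff_ne]
            exact fun h => hx h.symm
          simp [PySem.Chars.splitOn.go, hpre]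
        rw [hstep, ih f (x :: cur) acc hf]
        simp [pvCsplit, hx]

theorem pvSplitOn_eq (c : Char) (s : List Char) :
    PySem.Chars.splitOn s [c] = pvCsplit c s := by
  have h := pvSplitOn_go_eq c s (s.length + 1) [] [] (by omega)
  simp only [List.reverse_nil, List.nil_append] at h
  rw [pvCsplit_cons_headD_tail] at h
  exact h

theorem pvIsIn_singleton (c : Char) (s : List Char) :
    PySem.Chars.isIn [c] s = true ↔ c ∈ s := by
  rw [PySem.Chars.isIn_iff_infix, List.singleton_infix_iff]

theorem pvCsplit_of_not_mem (c : Char) (s : List Char) (h : c ∉ s) : pvCsplit c s = [s] := by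
  induction s with
  | nil => rfl
  | cons x xs ih =>
    simp only [List.mem_cons, not_or] at h
    have hx : ¬ x = c := fun hh => h.1 hh.symm
    simp [pvCsplit, hx, ih h.2]

theorem pvCsplit_two_le (c : Char) (s : List Char) :
    2 ≤ (pvCsplit c s).length ↔ c ∈ s := by
  induction s with
  | nil => simp [pvCsplit]
  | cons x xs ih =>
    by_cases hx : x = c
    · have hne := pvCsplit_ne_nil c xs
      have hl : 0 < (pvCsplit c xs).length := List.length_pos_of_ne_nil hne
      simp only [pvCsplit, if_pos hx, List.length_cons, List.mem_cons]
      constructor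
      · intro _; exact Or.inl hx.symm
      · intro _; omega
    · simp only [pvCsplit, if_neg hx, List.length_cons, List.mem_cons]
      cases h : pvCsplit c xs with
      | nil => exact absurd h (pvCsplit_ne_nil c xs)
      | cons a l =>
        simp only [h, List.length_cons, List.tail_cons] at ih ⊢
        constructor
        · intro hlen; exact Or.inr (ih.mp (by omega))
        · intro hm
          rcases hm with hm | hm
          · exact absurd hm.symm hx
          · have := ih.mpr hm; omega

theorem pvAfterLast_of_not_mem (c : Char) (s : List Char) (h : c ∉ s) :
    pvAfterLast c s = s := by
  induction s with
  | nil => rfl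
  | cons x xs ih =>
    simp only [List.mem_cons, not_or] at h
    have hx : ¬ x = c := fun hh => h.1 hh.symm
    simp [pvAfterLast, h.2, hx]

theorem pvGetLastD_csplit (c : Char) (s : List Char) :
    (pvCsplit c s).getLastD [] = pvAfterLast c s := by
  induction s with
  | nil => rfl
  | cons x xs ih =>
    by_cases hx : x = c
    · simp only [pvCsplit, if_pos hx, List.getLastD_cons, pvAfterLast]
      by_cases hm : c ∈ xs
      · rw [if_pos hm]; exact ih
      · rw [if_neg hm, ih]
        exact pvAfterLast_of_not_mem c xs hm
    · simp only [pvCsplit, if_neg hx, pvAfterLast]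
      by_cases hm : c ∈ xs
      · rw [if_pos hm]
        have h2 : 2 ≤ (pvCsplit c xs).length := (pvCsplit_two_le c xs).mpr hm
        cases hr : pvCsplit c xs with
        | nil => exact absurd hr (pvCsplit_ne_nil c xs)
        | cons a l =>
          cases l with
          | nil => rw [hr] at h2; simp at h2
          | cons b l' =>
            rw [← ih, hr]
            simp [List.getLastD_cons]
      · rw [if_neg hm, pvCsplit_of_not_mem c xs hm]
        simp

theorem pvDecomp (c : Char) (s : List Char) (h : c ∈ s) :
    ∃ p, s = p ++ c :: pvAfterLast c s := by
  induction s with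
  | nil => simp at h
  | cons x xs ih =>
    by_cases hm : c ∈ xs
    · obtain ⟨p, hp⟩ := ih hm
      refine ⟨x :: p, ?_⟩
      have hA : pvAfterLast c (x :: xs) = pvAfterLast c xs := by
        simp [pvAfterLast, hm]
      rw [hA, List.cons_append, ← hp]
    · rcases List.mem_cons.mp h with hx | hx
      · refine ⟨[], ?_⟩
        have hA : pvAfterLast c (x :: xs) = xs := by
          simp [pvAfterLast, hm, hx.symm]
        rw [hA, List.nil_append, hx]
      · exact absurd hx hm

theorem pvAfterLast_append (c : Char) (t : List Char) (ht : c ∉ t) :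
    ∀ p : List Char, pvAfterLast c (p ++ c :: t) = t := by
  intro p
  induction p with
  | nil => simp [pvAfterLast, ht]
  | cons x p' ih =>
    have hm : c ∈ p' ++ c :: t := by simp
    simp only [List.cons_append, pvAfterLast, if_pos hm]
    exact ih

theorem pvTakeWhile_all_append (p : Char → Bool) (l m : List Char) (x : Char)
    (h : l.all p = true) (hx : p x = false) : (l ++ x :: m).takeWhile p = l := by
  induction l with
  | nil => simp [List.takeWhile_cons, hx]
  | cons a l ih =>
    simp only [List.all_cons, Bool.and_eq_true] at h
    simp [h.1, ih h.2]

theorem pvSucc_val (c : Char) (hc : PySem.Chars.isdigit c = false) (cs : List Char)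
    (h : (cs.reverse.dropWhile PySem.Chars.isdigit).head? = some c) :
    pvAfterLast c cs = (cs.reverse.takeWhile PySem.Chars.isdigit).reverse := by
  set r := cs.reverse.takeWhile PySem.Chars.isdigit with hr
  set d := cs.reverse.dropWhile PySem.Chars.isdigit with hd
  have hsplit : r ++ d = cs.reverse := List.takeWhile_append_dropWhile
  cases hdc : d with
  | nil => rw [hdc] at h; simp at h
  | cons c₀ d' =>
    rw [hdc] at h
    simp only [List.head?_cons, Option.some.injEq] at h
    have hcs : cs = d'.reverse ++ c :: r.reverse := by
      have h1 : cs = (r ++ c₀ :: d').reverse := by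
        rw [← hdc, hsplit, List.reverse_reverse]
      rw [h1, h]; simp
    have hall : r.all PySem.Chars.isdigit = true := List.all_takeWhile
    have hcr : c ∉ r.reverse := by
      intro hmem
      rw [List.mem_reverse] at hmem
      have hdig := List.all_eq_true.mp hall c hmem
      rw [hc] at hdig; exact absurd hdig (by simp)
    rw [hcs, pvAfterLast_append c r.reverse hcr]

theorem pvSucc_iff (c : Char) (hc : PySem.Chars.isdigit c = false) (cs : List Char) :
    (c ∈ cs ∧ PySem.Chars.strIsdigit (pvAfterLast c cs) = true)
      ↔ (cs.reverse.takeWhile PySem.Chars.isdigit ≠ []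
          ∧ (cs.reverse.dropWhile PySem.Chars.isdigit).head? = some c) := by
  constructor
  · rintro ⟨hm, hdig⟩
    obtain ⟨p, hp⟩ := pvDecomp c cs hm
    have ht : ¬ (pvAfterLast c cs).isEmpty = true ∧ (pvAfterLast c cs).all PySem.Chars.isdigit = true := by
      have h1 := hdig
      unfold PySem.Chars.strIsdigit at h1
      simp only [Bool.and_eq_true, Bool.not_eq_true'] at h1
      exact ⟨by simp [h1.1], h1.2⟩
    have htne : pvAfterLast c cs ≠ [] := by
      intro hh; exact ht.1 (by simp [hh])
    have hrev : cs.reverse = (pvAfterLast c cs).reverse ++ c :: p.reverse := by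
      conv_lhs => rw [hp]
      simp
    have htw : cs.reverse.takeWhile PySem.Chars.isdigit = (pvAfterLast c cs).reverse := by
      rw [hrev]
      exact pvTakeWhile_all_append _ _ _ _ (by simpa using ht.2) hc
    have hdw : cs.reverse.dropWhile PySem.Chars.isdigit = c :: p.reverse := by
      have hsplit : cs.reverse.takeWhile PySem.Chars.isdigit ++ cs.reverse.dropWhile PySem.Chars.isdigit = cs.reverse :=
        List.takeWhile_append_dropWhile
      rw [htw] at hsplit
      exact List.append_cancel_left (hsplit.trans hrev)
    refine ⟨?_, by simp [hdw]⟩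
    rw [htw]
    simpa using htne
  · rintro ⟨hr, hd⟩
    have hval := pvSucc_val c hc cs hd
    set r := cs.reverse.takeWhile PySem.Chars.isdigit with hrdef
    set d := cs.reverse.dropWhile PySem.Chars.isdigit with hddef
    have hsplit : r ++ d = cs.reverse := List.takeWhile_append_dropWhile
    cases hdc : d with
    | nil => rw [hdc] at hd; simp at hd
    | cons c₀ d' =>
      rw [hdc] at hd
      simp only [List.head?_cons, Option.some.injEq] at hd
      have hcs : cs = d'.reverse ++ c :: r.reverse := by
        have h1 : cs = (r ++ c₀ :: d').reverse := by
          rw [← hdc, hsplit, List.reverse_reverse]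
        rw [h1, hd]; simp
      refine ⟨by rw [hcs]; simp, ?_⟩
      rw [hval]
      unfold PySem.Chars.strIsdigit
      have hall : r.all PySem.Chars.isdigit = true := List.all_takeWhile
      have h1 : ¬ (r.reverse.isEmpty = true) := by simpa using hr
      have h2 : r.reverse.all PySem.Chars.isdigit = true := by simpa using hall
      simp [h1, h2]

theorem pvAFor_eq (cs : List Char) :
    pvAFor cs [['_'], ['-']]
      = if '_' ∈ cs ∧ PySem.Chars.strIsdigit (pvAfterLast '_' cs) = true then
          PySem.Int.ofChars? (pvAfterLast '_' cs)
        else if '-' ∈ cs ∧ PySem.Chars.strIsdigit (pvAfterLast '-' cs) = true then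
          PySem.Int.ofChars? (pvAfterLast '-' cs)
        else none := by
  have key : ∀ (c : Char) (rest : List (List Char)),
      pvAFor cs ([c] :: rest)
        = if c ∈ cs ∧ PySem.Chars.strIsdigit (pvAfterLast c cs) = true then
            PySem.Int.ofChars? (pvAfterLast c cs)
          else pvAFor cs rest := by
    intro c rest
    by_cases hm : c ∈ cs
    · have hin : PySem.Chars.isIn [c] cs = true := (pvIsIn_singleton c cs).mpr hm
      have hlen : 2 ≤ (PySem.Chars.splitOn cs [c]).length := by
        rw [pvSplitOn_eq]; exact (pvCsplit_two_le c cs).mpr hm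
      have hlast : (PySem.Chars.splitOn cs [c]).getLastD [] = pvAfterLast c cs := by
        rw [pvSplitOn_eq]; exact pvGetLastD_csplit c cs
      simp only [pvAFor, hin, if_true, hlast]
      simp [hlen, hm]
    · have hin : PySem.Chars.isIn [c] cs = false := by
        rw [← Bool.not_eq_true, pvIsIn_singleton]; exact hm
      simp [pvAFor, hin, hm]
  rw [key, key]
  rfl

theorem pvBScan_take (cs : List Char) :
    ∀ i, i ≤ cs.length →
      pvBScan cs i = i - ((cs.take i).reverse.takeWhile PySem.Chars.isdigit).length := by
  intro i
  induction i with
  | zero => intro _; simp [pvBScan]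
  | succ i ih =>
    intro hle
    have hi : i < cs.length := by omega
    have htake : cs.take (i + 1) = cs.take i ++ [cs[i]] := List.take_succ_eq_append_getElem hi
    have hget : cs.getD i ' ' = cs[i] := by
      rw [List.getD_eq_getElem?_getD, List.getElem?_eq_getElem hi]; rfl
    by_cases hd : PySem.Chars.isdigit cs[i] = true
    · have hL : ((cs.take i).reverse.takeWhile PySem.Chars.isdigit).length ≤ i := by
        calc ((cs.take i).reverse.takeWhile PySem.Chars.isdigit).length
            ≤ (cs.take i).reverse.length := (List.takeWhile_sublist _).length_le
          _ = (cs.take i).length := by simp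
          _ ≤ i := by simp
      simp only [pvBScan, hget, hd, if_true, htake, List.reverse_append,
        List.reverse_cons, List.reverse_nil, List.nil_append, List.singleton_append,
        List.takeWhile_cons, List.length_cons]
      rw [ih (by omega)]
      omega
    · rw [Bool.not_eq_true] at hd
      simp only [pvBScan, hget, hd, Bool.false_eq_true, if_false, htake,
        List.reverse_append, List.reverse_cons, List.reverse_nil, List.nil_append,
        List.singleton_append, List.takeWhile_cons]
      simp

theorem pvBScan_eq (cs : List Char) :
    pvBScan cs cs.length = (cs.reverse.dropWhile PySem.Chars.isdigit).length := by
  have h := pvBScan_take cs cs.length (le_refl _)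
  rw [List.take_length] at h
  have hsplit : (cs.reverse.takeWhile PySem.Chars.isdigit).length
      + (cs.reverse.dropWhile PySem.Chars.isdigit).length = cs.length := by
    have h2 := congrArg List.length (List.takeWhile_append_dropWhile
      (p := PySem.Chars.isdigit) (l := cs.reverse))
    simp only [List.length_append, List.length_reverse] at h2
    exact h2
  omega

theorem pvMain_core (cs r d : List Char)
    (hr : r = cs.reverse.takeWhile PySem.Chars.isdigit)
    (hd : d = cs.reverse.dropWhile PySem.Chars.isdigit) :
    (if r ≠ [] ∧ d.head? = some '_' then PySem.Int.ofChars? (pvAfterLast '_' cs)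
     else if r ≠ [] ∧ d.head? = some '-' then PySem.Int.ofChars? (pvAfterLast '-' cs)
     else none)
      = if d.length < cs.length ∧ 0 < d.length ∧
            (cs.getD (d.length - 1) ' ' = '_' ∨ cs.getD (d.length - 1) ' ' = '-') then
          PySem.Int.ofChars? (cs.drop d.length)
        else none := by
  have hsplit : r ++ d = cs.reverse := by
    rw [hr, hd]; exact List.takeWhile_append_dropWhile
  have hlen : r.length + d.length = cs.length := by
    have h2 := congrArg List.length hsplit
    simp only [List.length_append, List.length_reverse] at h2
    exact h2
  have hcs : cs = d.reverse ++ r.reverse := by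
    have h1 : cs = (r ++ d).reverse := by rw [hsplit, List.reverse_reverse]
    rw [h1]; simp
  cases d with
  | nil => simp
  | cons c₀ d' =>
    have hdrop : cs.drop (c₀ :: d').length = r.reverse := by
      conv_lhs => rw [hcs]
      rw [show (c₀ :: d').length = (c₀ :: d').reverse.length by simp, List.drop_left]
    have hget : cs.getD ((c₀ :: d').length - 1) ' ' = c₀ := by
      have hcs2 : cs = d'.reverse ++ ([c₀] ++ r.reverse) := by rw [hcs]; simp
      have hl : (c₀ :: d').length - 1 = d'.length := by simp
      rw [hcs2, hl, List.getD_eq_getElem?_getD, List.getElem?_append_right (by simp)]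
      simp
    by_cases hrn : r = []
    · have hnlt : ¬ ((c₀ :: d').length < cs.length) := by
        rw [hrn] at hlen
        simp only [List.length_nil, Nat.zero_add] at hlen
        omega
      rw [if_neg (by simp [hrn]), if_neg (by simp [hrn]), if_neg (fun hc => hnlt hc.1)]
    · have h0r : 0 < r.length := List.length_pos_of_ne_nil hrn
      have hlt : (c₀ :: d').length < cs.length := by omega
      have h0d : 0 < (c₀ :: d').length := by simp
      by_cases h1 : c₀ = '_'
      · have hh : (cs.reverse.dropWhile PySem.Chars.isdigit).head? = some '_' := by
          rw [← hd]; simp [h1]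
        have hv : pvAfterLast '_' cs = r.reverse := by
          rw [pvSucc_val '_' (by decide) cs hh, ← hr]
        rw [if_pos ⟨hrn, by simp [h1]⟩,
          if_pos ⟨hlt, h0d, Or.inl (by rw [hget, h1])⟩, hv, hdrop]
      · by_cases h2 : c₀ = '-'
        · have hh : (cs.reverse.dropWhile PySem.Chars.isdigit).head? = some '-' := by
            rw [← hd]; simp [h2]
          have hv : pvAfterLast '-' cs = r.reverse := by
            rw [pvSucc_val '-' (by decide) cs hh, ← hr]
          rw [if_neg (by simp [h1]), if_pos ⟨hrn, by simp [h2]⟩,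
            if_pos ⟨hlt, h0d, Or.inr (by rw [hget, h2])⟩, hv, hdrop]
        · rw [if_neg (by simp [h1]), if_neg (by simp [h2]),
            if_neg (fun hc => by
              rcases hc with ⟨_, _, hx | hx⟩
              · exact h1 (hget.symm.trans hx)
              · exact h2 (hget.symm.trans hx))]

theorem pvMain (cs : List Char) :
    pvAFor cs [['_'], ['-']]
      = if pvBScan cs cs.length < cs.length ∧ 0 < pvBScan cs cs.length ∧
            (cs.getD (pvBScan cs cs.length - 1) ' ' = '_' ∨
              cs.getD (pvBScan cs cs.length - 1) ' ' = '-') then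
          PySem.Int.ofChars? (cs.drop (pvBScan cs cs.length))
        else none := by
  rw [pvAFor_eq]
  simp only [pvSucc_iff '_' (by decide) cs, pvSucc_iff '-' (by decide) cs]
  rw [pvBScan_eq]
  exact pvMain_core cs _ _ rfl rfl

-- ===== VERDICT (by name: the statement is the Claim_ definition above) =====
theorem extract_rule_id_py_spec : Claim_equal_extract_rule_id_py := by
  intro fp _
  unfold Spec_extract_rule_id_py extract_rule_id_py extract_rule_id_py_alt
  exact pvMain (pvStem fp)
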